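-- pv_equiv track=rewrite | github.com/JuanCorredor2310/App_Vanti | Codigo/archivo_menu.py | fechas_anuales
-- ===== SOURCE A (Python) =====
-- def fechas_anuales(dic):
--     c = 0
--     lista_fechas = []
--     for _, valor in dic.items():
--         if valor[1]:
--             if c == 0:
--                 lista_fechas.append([valor[0][0],valor[0][1]])
--                 c += 1
--             else:
--                 lista_fechas.append([valor[0][0],valor[0][1]])
--                 c = 0
--     lista_fecha_anual = [(lista_fechas[0][0],lista_fechas[0][1]),(lista_fechas[-1][0],lista_fechas[-1][1])]
--     return lista_fecha_anual
-- ===== SOURCE B (Python) =====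
-- def fechas_anuales(dic):
--     vals = list(dic.values())
--     inicio = next(v[0] for v in vals if v[1])
--     fin = next(v[0] for v in reversed(vals) if v[1])
--     return [(inicio[0], inicio[1]), (fin[0], fin[1])]
-- ===== Notes on version B (the rewrite author's own statement) =====
-- stated objective: simpler
-- what changed: B finds the first flagged pair with a forward short-circuit scan and the last flagged pair with a short-circuit scan over the reversed values, instead of accumulating every flagged pair in a list (with a dead counter) and indexing it at [0] and [-1]; Pre_ excludes inputs with no flagged entry, where A raises IndexError (B also raises, StopIteration).
-- outside the precondition, e.g. on fechas_anuales({}): A raises IndexError, B raises StopIteration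
import Mathlib
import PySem

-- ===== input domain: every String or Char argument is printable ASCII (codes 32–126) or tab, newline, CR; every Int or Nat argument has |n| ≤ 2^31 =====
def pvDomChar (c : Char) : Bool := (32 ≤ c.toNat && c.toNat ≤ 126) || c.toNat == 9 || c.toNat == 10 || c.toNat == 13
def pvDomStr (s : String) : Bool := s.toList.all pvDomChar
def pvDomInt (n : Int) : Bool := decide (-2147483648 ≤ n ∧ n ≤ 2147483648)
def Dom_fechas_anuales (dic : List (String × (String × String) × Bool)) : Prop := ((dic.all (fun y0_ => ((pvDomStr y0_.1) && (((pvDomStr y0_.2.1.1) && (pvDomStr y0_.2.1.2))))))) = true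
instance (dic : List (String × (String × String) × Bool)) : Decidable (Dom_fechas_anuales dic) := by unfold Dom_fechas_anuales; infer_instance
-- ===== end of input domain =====

-- B finds the first flagged pair by a forward short-circuit scan and the last by a scan over
-- the reversed values, instead of accumulating all flagged pairs and indexing [0] and [-1].


-- ===== PORT A =====
-- for-loop over dic.items() with state (c, lista_fechas); both appending branches kept as in A
def pvFoldA (dic : List (String × (String × String) × Bool)) : Int × List (String × String) :=
  dic.foldl
    (fun (st : Int × List (String × String)) kv =>
      if kv.2.2 then
        if st.1 = 0 then (st.1 + 1, st.2 ++ [(kv.2.1.1, kv.2.1.2)])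
        else (0, st.2 ++ [(kv.2.1.1, kv.2.1.2)])
      else st)
    (0, [])

def fechas_anuales (dic : List (String × (String × String) × Bool)) : List (String × String) :=
  match PySem.List.pyGet? (pvFoldA dic).2 0, PySem.List.pyGet? (pvFoldA dic).2 (-1) with
  | some a, some b => [(a.1, a.2), (b.1, b.2)]
  | _, _ => []  -- lista_fechas[0] raises IndexError here; excluded by Pre_

-- ===== PORT B =====
-- next(v[0] for v in vals if v[1]) = find? forward; the second next scans reversed(vals)
def fechas_anuales_alt (dic : List (String × (String × String) × Bool)) : List (String × String) :=
  match (dic.find? (fun kv => kv.2.2)).map (fun kv => kv.2.1) with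
  | none => []  -- the first next() raises StopIteration here; excluded by Pre_
  | some inicio =>
    match (dic.reverse.find? (fun kv => kv.2.2)).map (fun kv => kv.2.1) with
    | none => []  -- unreachable when a flagged entry exists
    | some fin => [(inicio.1, inicio.2), (fin.1, fin.2)]

-- ===== PRECONDITION & SPEC =====
-- Pre_ excludes dicts with no entry whose flag is true: there A raises IndexError
-- (lista_fechas[0] on the empty list) and B raises StopIteration.
def Pre_fechas_anuales (dic : List (String × (String × String) × Bool)) : Prop :=
  dic.any (fun kv => kv.2.2) = true
instance (dic : List (String × (String × String) × Bool)) : Decidable (Pre_fechas_anuales dic) := by unfold Pre_fechas_anuales; infer_instance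
def pvWitness_fechas_anuales : (List (String × (String × String) × Bool)) :=
  [("enero", (("2020-01-01", "2020-12-31"), true))]

def Spec_fechas_anuales (dic : List (String × (String × String) × Bool)) (out : List (String × String)) : Prop := out = fechas_anuales_alt dic
instance (dic : List (String × (String × String) × Bool)) (out : List (String × String)) : Decidable (Spec_fechas_anuales dic out) := by unfold Spec_fechas_anuales; infer_instance

-- ===== CLAIM (what is proved, stated in full; the proofs are below) =====
def Claim_equal_fechas_anuales : Prop := ∀ (dic : List (String × (String × String) × Bool)), Dom_fechas_anuales dic → Pre_fechas_anuales dic → Spec_fechas_anuales dic (fechas_anuales dic)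

-- ===== LEMMAS AND PROOFS =====

-- the list of flagged pairs: A's fold builds it, B's two scans take its head and last
def pvMatches (dic : List (String × (String × String) × Bool)) : List (String × String) :=
  dic.filterMap (fun kv => if kv.2.2 then some (kv.2.1.1, kv.2.1.2) else none)

theorem foldA_snd (dic : List (String × (String × String) × Bool)) :
    ∀ (c : Int) (acc : List (String × String)),
    (dic.foldl
      (fun (st : Int × List (String × String)) kv =>
        if kv.2.2 then
          if st.1 = 0 then (st.1 + 1, st.2 ++ [(kv.2.1.1, kv.2.1.2)])
          else (0, st.2 ++ [(kv.2.1.1, kv.2.1.2)])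
        else st)
      (c, acc)).2 = acc ++ pvMatches dic := by
  induction dic with
  | nil => intro c acc; simp [pvMatches]
  | cons kv t ih =>
    intro c acc
    by_cases h : kv.2.2 = true
    · by_cases hc : c = 0 <;> simp [pvMatches, h, hc, ih]
    · simp [pvMatches, h, ih]

theorem find?_eq_head (dic : List (String × (String × String) × Bool)) :
    (dic.find? (fun kv => kv.2.2)).map (fun kv => kv.2.1) = (pvMatches dic).head? := by
  induction dic with
  | nil => simp [pvMatches]
  | cons kv t ih =>
    by_cases h : kv.2.2 = true
    · simp [pvMatches, h]
    · simp [pvMatches, h, ih]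

theorem matches_reverse (dic : List (String × (String × String) × Bool)) :
    pvMatches dic.reverse = (pvMatches dic).reverse := by
  simp [pvMatches, List.filterMap_reverse]

theorem pre_matches_ne_nil (dic : List (String × (String × String) × Bool))
    (h : Pre_fechas_anuales dic) : pvMatches dic ≠ [] := by
  unfold Pre_fechas_anuales at h
  rw [List.any_eq_true] at h
  obtain ⟨kv, hmem, hkv⟩ := h
  intro hnil
  have : (kv.2.1.1, kv.2.1.2) ∈ pvMatches dic :=
    List.mem_filterMap.mpr ⟨kv, hmem, by simp [hkv]⟩
  rw [hnil] at this
  exact absurd this (List.not_mem_nil)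

-- ===== VERDICT (by name: the statement is the Claim_ definition above) =====
theorem fechas_anuales_spec : Claim_equal_fechas_anuales := by
  intro dic _ hpre
  unfold Spec_fechas_anuales fechas_anuales fechas_anuales_alt pvFoldA
  rw [foldA_snd dic 0 [], find?_eq_head dic, find?_eq_head dic.reverse, matches_reverse,
    List.head?_reverse]
  have hne := pre_matches_ne_nil dic hpre
  obtain ⟨a, t, hm⟩ : ∃ a t, pvMatches dic = a :: t :=
    match pvMatches dic, hne with
    | a :: t, _ => ⟨a, t, rfl⟩
  obtain ⟨b, hb⟩ : ∃ b, (pvMatches dic).getLast? = some b := by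
    rw [hm]; exact ⟨(a :: t).getLast (by simp), List.getLast?_eq_some_getLast (by simp)⟩
  simp [hm, PySem.List.pyGet?_neg_one, hm ▸ hb]
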